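-- pv_equiv track=rewrite | github.com/crissdiamond/crisAI | src/crisai/workspace/artefact_validation.py | _path_has_prefix
-- ===== SOURCE A (Python) =====
-- def _norm_path_sep(rel: str) -> str:
--     return rel.replace("\\", "/")
--
-- def _path_has_prefix(rel_posix: str, prefix: str) -> bool:
--     """True when ``rel_posix`` is exactly the prefix path or a child of it.
--
--     Uses path segments so ``workspace/context`` does not match
--     ``workspace/context_staging``.
--     """
--     prefix_norm = _norm_path_sep(prefix.strip().strip("/"))
--     path_norm = _norm_path_sep(rel_posix.strip().strip("/"))
--     p_parts = [p for p in path_norm.split("/") if p]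
--     pre_parts = [p for p in prefix_norm.split("/") if p]
--     if not pre_parts:
--         return True
--     if len(p_parts) < len(pre_parts):
--         return False
--     return p_parts[: len(pre_parts)] == pre_parts
-- ===== SOURCE B (Python) =====
-- def _path_has_prefix(rel_posix: str, prefix: str) -> bool:
--     """True when ``rel_posix`` is exactly the prefix path or a child of it."""
--
--     def canon(s: str) -> str:
--         # one pass: drop leading/trailing separators, collapse runs of '/'
--         # or '\' into a single '/', keep everything else verbatim
--         out = []
--         pending = False
--         for ch in s.strip():
--             if ch == "/" or ch == "\\":
--                 pending = True
--             else:
--                 if pending and out: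
--                     out.append("/")
--                 pending = False
--                 out.append(ch)
--         return "".join(out)
--
--     p = canon(rel_posix)
--     q = canon(prefix)
--     if not q:
--         return True
--     return p == q or p.startswith(q + "/")
-- ===== Notes on version B (the rewrite author's own statement) =====
-- stated objective: alternative
-- what changed: B canonicalizes each path in a single character-level state-machine pass (dropping leading/trailing separators and collapsing separator runs to '/' on the fly, with no split/filter segment lists) and then decides by comparing the two canonical strings, instead of A's staged strip/strip('/')/replace/split/filter pipeline with a length check and list-slice comparison of segment lists.
import Mathlib
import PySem

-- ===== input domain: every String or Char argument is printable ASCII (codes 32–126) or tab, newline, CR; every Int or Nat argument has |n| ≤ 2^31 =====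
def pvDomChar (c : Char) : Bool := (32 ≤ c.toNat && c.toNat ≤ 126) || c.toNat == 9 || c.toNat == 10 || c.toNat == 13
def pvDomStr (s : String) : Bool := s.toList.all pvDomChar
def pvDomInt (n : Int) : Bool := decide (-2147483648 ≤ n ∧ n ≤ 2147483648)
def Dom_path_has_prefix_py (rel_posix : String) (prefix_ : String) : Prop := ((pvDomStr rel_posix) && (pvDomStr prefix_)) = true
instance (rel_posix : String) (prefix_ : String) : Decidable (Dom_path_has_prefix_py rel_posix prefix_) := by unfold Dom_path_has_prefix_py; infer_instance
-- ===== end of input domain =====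

-- B canonicalizes each path with a single character-level state-machine pass (no segment lists) and compares the canonical strings; A builds segment lists via strip/replace/split/filter and compares a slice. Same return value; objective: alternative decomposition.


-- ===== PORT A =====
-- Python helper _norm_path_sep(rel) = rel.replace("\\", "/")
def path_has_prefix_norm_sep (rel : List Char) : List Char :=
  PySem.Chars.replace rel ['\\'] ['/']

-- literal transliteration of _path_has_prefix (strings handled on code points via PySem.Chars)
def path_has_prefix_py (rel_posix : String) (prefix_ : String) : Bool :=
  let prefix_norm := path_has_prefix_norm_sep (PySem.Chars.stripChars (PySem.Chars.strip prefix_.toList) ['/'])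
  let path_norm := path_has_prefix_norm_sep (PySem.Chars.stripChars (PySem.Chars.strip rel_posix.toList) ['/'])
  let p_parts := ((PySem.Chars.split? path_norm ['/']).getD []).filter (fun p => !p.isEmpty)
  let pre_parts := ((PySem.Chars.split? prefix_norm ['/']).getD []).filter (fun p => !p.isEmpty)
  if pre_parts.isEmpty then true
  else if p_parts.length < pre_parts.length then false
  else PySem.List.slice p_parts none (some (pre_parts.length : Int)) == pre_parts

-- ===== PORT B =====
-- Source B's loop body: state = (out, pending); separators set pending, other chars flush it
def path_canon_step (st : List Char × Bool) (ch : Char) : List Char × Bool :=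
  if ch == '/' || ch == '\\' then (st.1, true)
  else ((if st.2 && !st.1.isEmpty then st.1 ++ ['/'] else st.1) ++ [ch], false)

-- Source B's canon(s): one fold over s.strip()
def path_canon (s : String) : List Char :=
  ((PySem.Chars.strip s.toList).foldl path_canon_step ([], false)).1

def path_has_prefix_py_alt (rel_posix : String) (prefix_ : String) : Bool :=
  let p := path_canon rel_posix
  let q := path_canon prefix_
  if q.isEmpty then true
  else p == q || PySem.Chars.startswith p (q ++ ['/'])

-- ===== PRECONDITION & SPEC =====
def Spec_path_has_prefix_py (rel_posix : String) (prefix_ : String) (out : Bool) : Prop := out = path_has_prefix_py_alt rel_posix prefix_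
instance (rel_posix : String) (prefix_ : String) (out : Bool) : Decidable (Spec_path_has_prefix_py rel_posix prefix_ out) := by unfold Spec_path_has_prefix_py; infer_instance

-- ===== CLAIM (what is proved, stated in full; the proofs are below) =====
def Claim_equal_path_has_prefix_py : Prop := ∀ (rel_posix : String) (prefix_ : String), Dom_path_has_prefix_py rel_posix prefix_ → Spec_path_has_prefix_py rel_posix prefix_ (path_has_prefix_py rel_posix prefix_)

-- ===== LEMMAS AND PROOFS =====

-- the character map performed by replace("\\", "/")
def pvF (c : Char) : Char := if c = '\\' then '/' else c

theorem pv_replace_go (fuel : Nat) : ∀ (l acc : List Char), l.length ≤ fuel →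
    PySem.Chars.replace.go ['\\'] ['/'] fuel l acc = acc.reverse ++ l.map pvF := by
  induction fuel with
  | zero =>
    intro l acc hl
    have : l = [] := List.eq_nil_of_length_eq_zero (Nat.le_zero.mp hl)
    subst this; simp [PySem.Chars.replace.go]
  | succ n ih =>
    intro l acc hl
    cases l with
    | nil => simp [PySem.Chars.replace.go]
    | cons c t =>
      simp only [PySem.Chars.replace.go]
      by_cases hc : c = '\\'
      · subst hc
        simp only [List.isPrefixOf, beq_self_eq_true, Bool.true_and, if_true]
        rw [show List.drop (['\\'] : List Char).length ('\\' :: t) = t from rfl,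
          ih t _ (by simp at hl ⊢; omega)]
        simp [pvF]
      · rw [show List.isPrefixOf ['\\'] (c :: t) = false by
          simp [List.isPrefixOf]; intro h; exact absurd h.symm hc]
        simp only [Bool.false_eq_true, if_false]
        rw [ih _ _ (by simp at hl ⊢; omega)]
        simp [pvF, hc]

theorem pv_replace_map (l : List Char) :
    PySem.Chars.replace l ['\\'] ['/'] = l.map pvF := by
  simp only [PySem.Chars.replace, List.isEmpty_cons, Bool.false_eq_true, if_false]
  exact pv_replace_go l.length l [] (le_refl _)

-- reference splitter on '/', structural recursion
def pvSplit : List Char → List (List Char)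
  | [] => [[]]
  | c :: t => if c = '/' then [] :: pvSplit t else (pvSplit t).modifyHead (c :: ·)

theorem pvSplit_ne_nil (l : List Char) : pvSplit l ≠ [] := by
  induction l with
  | nil => simp [pvSplit]
  | cons c t ih =>
    simp only [pvSplit]
    split_ifs
    · simp
    · cases h : pvSplit t with
      | nil => exact absurd h ih
      | cons a r => simp [h, List.modifyHead]

theorem pv_modifyHead_comp {α : Type} (f g : α → α) (l : List α) :
    (l.modifyHead g).modifyHead f = l.modifyHead (fun x => f (g x)) := by
  cases l <;> simp [List.modifyHead]

theorem pv_modifyHead_append {α : Type} (f : α → α) (l l' : List α) (h : l ≠ []) :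
    (l ++ l').modifyHead f = l.modifyHead f ++ l' := by
  cases l with
  | nil => exact absurd rfl h
  | cons a t => simp [List.modifyHead]

theorem pv_split_go (fuel : Nat) : ∀ (l cur : List Char) (acc : List (List Char)),
    l.length < fuel →
    PySem.Chars.splitOn.go ['/'] fuel l cur acc
      = acc.reverse ++ (pvSplit l).modifyHead (cur.reverse ++ ·) := by
  induction fuel with
  | zero => intro l cur acc h; omega
  | succ n ih =>
    intro l cur acc hl
    cases l with
    | nil => simp [PySem.Chars.splitOn.go, pvSplit, List.modifyHead]
    | cons c t =>
      simp only [PySem.Chars.splitOn.go]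
      by_cases hc : c = '/'
      · subst hc
        rw [show List.isPrefixOf ['/'] ('/' :: t) = true by simp [List.isPrefixOf]]
        rw [show List.drop (['/'] : List Char).length ('/' :: t) = t from rfl]
        simp only [if_true]
        rw [ih t [] (cur.reverse :: acc) (by simp at hl ⊢; omega)]
        simp only [pvSplit, if_true, List.reverse_cons, List.modifyHead, List.append_assoc,
          List.singleton_append, List.nil_append]
        cases pvSplit t <;> simp [List.modifyHead]
      · rw [show List.isPrefixOf ['/'] (c :: t) = false by
          simp [List.isPrefixOf]; intro h; exact absurd h.symm hc]
        simp only [Bool.false_eq_true, if_false]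
        rw [ih t (c :: cur) acc (by simp at hl ⊢; omega)]
        simp only [pvSplit, hc, if_false, List.reverse_cons]
        rw [pv_modifyHead_comp]
        congr 2
        funext x
        simp

theorem pv_splitOn_eq (l : List Char) : PySem.Chars.splitOn l ['/'] = pvSplit l := by
  rw [PySem.Chars.splitOn, pv_split_go (l.length + 1) l [] [] (by omega)]
  simp only [List.reverse_nil, List.nil_append]
  cases h : pvSplit l with
  | nil => exact absurd h (pvSplit_ne_nil l)
  | cons a r => simp [List.modifyHead]

-- keep the nonempty pieces
def pvFN (qs : List (List Char)) : List (List Char) := qs.filter (fun p => !p.isEmpty)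

-- canonical '/'-join of the nonempty pieces of w (after mapping '\' to '/')
def pvJ (w : List Char) : List Char := PySem.Chars.join ['/'] (pvFN (pvSplit (w.map pvF)))

theorem pv_join_cons (x : List Char) (r : List (List Char)) :
    PySem.Chars.join ['/'] (x :: r)
      = x ++ (if r.isEmpty then [] else '/' :: PySem.Chars.join ['/'] r) := by
  cases r with
  | nil => simp [PySem.Chars.join_singleton]
  | cons y s => rw [PySem.Chars.join_cons_cons]; simp

-- reference for the fold's tail behaviour: pvExt w b = what the loop appends after a nonempty out
def pvExt : List Char → Bool → List Char
  | [], _ => []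
  | c :: t, b =>
      if c == '/' || c == '\\' then pvExt t true
      else (if b then ['/', c] else [c]) ++ pvExt t false

-- reference for the whole loop starting from an empty out
def pvH : List Char → List Char
  | [] => []
  | c :: t => if c == '/' || c == '\\' then pvH t else c :: pvExt t false

theorem pv_ext_char (w : List Char) : ∀ b : Bool,
    pvExt w b = (if pvFN (pvSplit (w.map pvF)) ≠ [] ∧ (b = true ∨ (pvSplit (w.map pvF)).headD [] = [])
        then ['/'] else []) ++ pvJ w := by
  induction w with
  | nil => intro b; simp [pvExt, pvJ, pvSplit, pvFN, PySem.Chars.join, List.intercalate]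
  | cons c t ih =>
    intro b
    by_cases hc : c = '/' ∨ c = '\\'
    · have hsep : (c == '/' || c == '\\') = true := by
        rcases hc with h | h <;> simp [h]
      have hf : pvF c = '/' := by rcases hc with h | h <;> simp [pvF, h]
      simp only [pvExt, hsep, if_true, List.map_cons, hf]
      rw [ih true]
      have hs : pvSplit ('/' :: t.map pvF) = [] :: pvSplit (t.map pvF) := by simp [pvSplit]
      have hfn : pvFN ([] :: pvSplit (t.map pvF)) = pvFN (pvSplit (t.map pvF)) := by simp [pvFN]
      simp only [pvJ, List.map_cons, hf, hs, hfn, List.headD_cons]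
      simp
    · push_neg at hc
      have hsep : (c == '/' || c == '\\') = false := by
        simp [hc.1, hc.2]
      have hf : pvF c = c := by simp [pvF, hc.2]
      obtain ⟨h₀, tl, hq⟩ : ∃ a r, pvSplit (t.map pvF) = a :: r := by
        cases h : pvSplit (t.map pvF) with
        | nil => exact absurd h (pvSplit_ne_nil _)
        | cons a r => exact ⟨a, r, rfl⟩
      have hsplit : pvSplit ((c :: t).map pvF) = (c :: h₀) :: tl := by
        simp only [List.map_cons, hf, pvSplit, hc.1, if_false, hq, List.modifyHead]
      simp only [pvExt, hsep, Bool.false_eq_true, if_false]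
      rw [ih false]
      simp only [pvJ, hsplit, hq]
      have hfn2 : pvFN ((c :: h₀) :: tl) = (c :: h₀) :: pvFN tl := by
        simp [pvFN]
      rw [hfn2, pv_join_cons]
      by_cases h0 : h₀ = []
      · subst h0
        have : pvFN ([] :: tl) = pvFN tl := by simp [pvFN]
        simp only [this, List.headD_cons]
        by_cases htl : pvFN tl = []
        · simp [htl, List.isEmpty_iff]
          cases b <;> simp
        · have : (pvFN tl).isEmpty = false := by
            cases h1 : pvFN tl with
            | nil => exact absurd h1 htl
            | cons a r => simp
          simp only [htl, this, Bool.false_eq_true, if_false,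
            ne_eq, not_false_iff, true_and]
          cases b <;> simp
      · have hfn3 : pvFN (h₀ :: tl) = h₀ :: pvFN tl := by
          simp [pvFN, List.isEmpty_iff, h0]
        simp only [hfn3, List.headD_cons, h0]
        have hjoin : PySem.Chars.join ['/'] (h₀ :: pvFN tl)
            = h₀ ++ (if (pvFN tl).isEmpty then [] else '/' :: PySem.Chars.join ['/'] (pvFN tl)) :=
          pv_join_cons _ _
        rw [hjoin]
        cases b <;> simp [h0]

theorem pv_h_char (w : List Char) : pvH w = pvJ w := by
  induction w with
  | nil => simp [pvH, pvJ, pvSplit, pvFN, PySem.Chars.join, List.intercalate]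
  | cons c t ih =>
    by_cases hc : c = '/' ∨ c = '\\'
    · have hsep : (c == '/' || c == '\\') = true := by
        rcases hc with h | h <;> simp [h]
      have hf : pvF c = '/' := by rcases hc with h | h <;> simp [pvF, h]
      have hs : pvSplit ('/' :: t.map pvF) = [] :: pvSplit (t.map pvF) := by simp [pvSplit]
      simp only [pvH, hsep, if_true, ih, pvJ, List.map_cons, hf, hs]
      simp [pvFN]
    · push_neg at hc
      have hsep : (c == '/' || c == '\\') = false := by simp [hc.1, hc.2]
      have hf : pvF c = c := by simp [pvF, hc.2]
      obtain ⟨h₀, tl, hq⟩ : ∃ a r, pvSplit (t.map pvF) = a :: r := by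
        cases h : pvSplit (t.map pvF) with
        | nil => exact absurd h (pvSplit_ne_nil _)
        | cons a r => exact ⟨a, r, rfl⟩
      have hsplit : pvSplit ((c :: t).map pvF) = (c :: h₀) :: tl := by
        simp only [List.map_cons, hf, pvSplit, hc.1, if_false, hq, List.modifyHead]
      simp only [pvH, hsep, Bool.false_eq_true, if_false]
      rw [pv_ext_char t false]
      simp only [pvJ, hsplit, hq]
      have hfn2 : pvFN ((c :: h₀) :: tl) = (c :: h₀) :: pvFN tl := by simp [pvFN]
      rw [hfn2, pv_join_cons]
      by_cases h0 : h₀ = []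
      · subst h0
        have : pvFN ([] :: tl) = pvFN tl := by simp [pvFN]
        simp only [this, List.headD_cons]
        by_cases htl : pvFN tl = []
        · simp [htl, List.isEmpty_iff]
        · have hie : (pvFN tl).isEmpty = false := by
            cases h1 : pvFN tl with
            | nil => exact absurd h1 htl
            | cons a r => simp
          simp [htl, hie]
      · have hfn3 : pvFN (h₀ :: tl) = h₀ :: pvFN tl := by
          simp [pvFN, List.isEmpty_iff, h0]
        simp only [hfn3, List.headD_cons, h0]
        rw [pv_join_cons]
        simp [h0]

-- loop invariant for Source B's fold
theorem pv_fold_inv (w : List Char) : ∀ (out : List Char) (b : Bool),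
    (w.foldl path_canon_step (out, b)).1
      = if out = [] then pvH w else out ++ pvExt w b := by
  induction w with
  | nil =>
    intro out b
    by_cases h : out = [] <;> simp [h, pvH, pvExt]
  | cons c t ih =>
    intro out b
    simp only [List.foldl_cons]
    by_cases hc : (c == '/' || c == '\\') = true
    · simp only [path_canon_step, hc, if_true]
      rw [ih out true]
      simp only [pvH, pvExt, hc, if_true]
    · simp only [path_canon_step, hc, Bool.false_eq_true, if_false]
      by_cases hout : out = []
      · subst hout
        simp only [List.isEmpty_nil, Bool.not_true, Bool.and_false, Bool.false_eq_true,
          if_false, List.nil_append, if_true]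
        rw [ih [c] false]
        simp only [List.cons_ne_self, if_false]
        simp only [pvH, hc, Bool.false_eq_true, if_false]
        simp
      · have hie : out.isEmpty = false := by
          cases h : out with
          | nil => exact absurd h hout
          | cons a r => simp
        simp only [hie, Bool.not_false, Bool.and_true]
        rw [ih _ false]
        have hne : (if b = true then out ++ ['/'] else out) ++ [c] ≠ [] := by simp
        simp only [hne, if_false]
        simp only [pvExt, hc, Bool.false_eq_true, if_false]
        cases b <;> simp [hout]

theorem pv_canon_eq (s : String) : path_canon s = pvJ (PySem.Chars.strip s.toList) := by
  rw [path_canon, pv_fold_inv _ [] false]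
  simp [pv_h_char]

-- ===== pvSplit facts used for stripChars-invariance =====

theorem pv_split_concat (l : List Char) : pvSplit (l ++ ['/']) = pvSplit l ++ [[]] := by
  induction l with
  | nil => simp [pvSplit]
  | cons c t ih =>
    by_cases hc : c = '/'
    · subst hc; simp [pvSplit, ih]
    · simp only [List.cons_append, pvSplit, hc, if_false, ih]
      rw [pv_modifyHead_append _ _ _ (pvSplit_ne_nil t)]

theorem pv_trailing (r : List Char) : ∀ (sl : List Char), (∀ c ∈ sl, c = '/') →
    pvFN (pvSplit (r ++ sl)) = pvFN (pvSplit r) := by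
  intro sl
  induction sl using List.reverseRecOn generalizing r with
  | nil => intro _; simp
  | append_singleton sl c ih =>
    intro hall
    have hc : c = '/' := hall c (by simp)
    subst hc
    rw [show r ++ (sl ++ ['/']) = (r ++ sl) ++ ['/'] by simp]
    rw [pv_split_concat]
    have : pvFN (pvSplit (r ++ sl) ++ [[]]) = pvFN (pvSplit (r ++ sl)) := by
      simp [pvFN]
    rw [this]
    exact ih r (fun x hx => hall x (by simp [hx]))

theorem pv_leading (m : List Char) :
    pvFN (pvSplit ((m.dropWhile (fun c => c == '/')).map pvF))
      = pvFN (pvSplit (m.map pvF)) := by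
  induction m with
  | nil => simp
  | cons c t ih =>
    by_cases hc : c = '/'
    · subst hc
      simp only [List.dropWhile_cons, beq_self_eq_true, if_true]
      rw [ih]
      simp only [List.map_cons, show pvF '/' = '/' from rfl]
      rw [show pvSplit ('/' :: t.map pvF) = [] :: pvSplit (t.map pvF) by simp [pvSplit]]
      simp [pvFN]
    · simp [List.dropWhile_cons, hc]

theorem pv_stripChars_eq (m : List Char) :
    PySem.Chars.stripChars m ['/']
      = List.rdropWhile (fun c => c == '/') (m.dropWhile (fun c => c == '/')) := by
  have hp : (fun c => (['/'] : List Char).contains c) = (fun c => c == '/') := by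
    funext c; simp only [List.contains_eq_mem, List.mem_singleton]; rw [Bool.eq_iff_iff]; simp
  simp only [PySem.Chars.stripChars, List.rdropWhile]
  rw [hp]

theorem pv_strip_inv (m : List Char) :
    pvFN (pvSplit ((PySem.Chars.stripChars m ['/']).map pvF)) = pvFN (pvSplit (m.map pvF)) := by
  rw [pv_stripChars_eq]
  set p : Char → Bool := fun c => c == '/' with hp
  have hdecomp : List.rdropWhile p (m.dropWhile p) ++ List.rtakeWhile p (m.dropWhile p)
      = m.dropWhile p := List.rdropWhile_append_rtakeWhile
  have htail : pvFN (pvSplit ((List.rdropWhile p (m.dropWhile p)).map pvF))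
      = pvFN (pvSplit ((m.dropWhile p).map pvF)) := by
    conv_rhs => rw [← hdecomp]
    rw [List.map_append]
    rw [pv_trailing]
    intro c hc
    simp only [List.mem_map] at hc
    obtain ⟨x, hx, hfx⟩ := hc
    have : p x = true := List.mem_rtakeWhile_imp hx
    simp only [hp, beq_iff_eq] at this
    subst this
    simpa [pvF] using hfx.symm
  rw [htail, hp]
  exact pv_leading m

-- ===== goodness of the segments (nonempty, slash-free) =====

def pvGood (xs : List (List Char)) : Prop := ∀ x ∈ xs, x ≠ [] ∧ '/' ∉ x

theorem pv_split_noslash (w : List Char) : ∀ x ∈ pvSplit w, '/' ∉ x := by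
  induction w with
  | nil => intro x hx; simp [pvSplit] at hx; simp [hx]
  | cons c t ih =>
    intro x hx
    by_cases hc : c = '/'
    · subst hc
      simp only [pvSplit, if_true] at hx
      rcases List.mem_cons.mp hx with h | h
      · simp [h]
      · exact ih x h
    · obtain ⟨h₀, tl, hq⟩ : ∃ a r, pvSplit t = a :: r := by
        cases h : pvSplit t with
        | nil => exact absurd h (pvSplit_ne_nil _)
        | cons a r => exact ⟨a, r, rfl⟩
      simp only [pvSplit, hc, if_false, hq, List.modifyHead] at hx
      rcases List.mem_cons.mp hx with h | h
      · subst h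
        intro hmem
        rcases List.mem_cons.mp hmem with h | h
        · exact hc h.symm
        · exact ih h₀ (by simp [hq]) h
      · exact ih x (by simp [hq, h])

theorem pv_good (w : List Char) : pvGood (pvFN (pvSplit w)) := by
  intro x hx
  have h := List.mem_filter.mp hx
  refine ⟨by simpa [List.isEmpty_iff] using h.2, pv_split_noslash w x h.1⟩

-- ===== the heart: A's slice test = B's canonical-string test, on good segment lists =====

def pvJoin' (xs : List (List Char)) : List Char := (xs.map (· ++ ['/'])).flatten

theorem pvJoin'_eq (xs : List (List Char)) (h : xs ≠ []) :
    pvJoin' xs = PySem.Chars.join ['/'] xs ++ ['/'] := by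
  induction xs with
  | nil => exact absurd rfl h
  | cons x rest ih =>
    cases rest with
    | nil => simp [pvJoin', PySem.Chars.join_singleton]
    | cons y r =>
      rw [PySem.Chars.join_cons_cons]
      have : pvJoin' (x :: y :: r) = (x ++ ['/']) ++ pvJoin' (y :: r) := by
        simp [pvJoin']
      rw [this, ih (by simp)]
      simp

theorem pv_join_ne_nil (x : List Char) (rest : List (List Char)) (hx : x ≠ []) :
    PySem.Chars.join ['/'] (x :: rest) ≠ [] := by
  cases rest with
  | nil => simpa [PySem.Chars.join_singleton] using hx
  | cons y r => rw [PySem.Chars.join_cons_cons]; simp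

theorem pv_seg_prefix (a : List Char) : ∀ (b x y : List Char), '/' ∉ a → '/' ∉ b →
    (a ++ '/' :: x) <+: (b ++ '/' :: y) → a = b ∧ x <+: y := by
  induction a with
  | nil =>
    intro b x y _ hb hpre
    cases b with
    | nil =>
      refine ⟨rfl, ?_⟩
      simpa using hpre
    | cons d b' =>
      exfalso
      rw [List.nil_append, List.cons_append, List.cons_prefix_cons] at hpre
      exact hb (hpre.1 ▸ List.mem_cons_self)
  | cons c a' ih =>
    intro b x y ha hb hpre
    cases b with
    | nil =>
      exfalso
      rw [List.cons_append, List.nil_append, List.cons_prefix_cons] at hpre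
      exact ha (hpre.1 ▸ List.mem_cons_self)
    | cons d b' =>
      rw [List.cons_append, List.cons_append, List.cons_prefix_cons] at hpre
      obtain ⟨heq, hrest⟩ := ih b' x y (fun h => ha (List.mem_cons_of_mem _ h))
        (fun h => hb (List.mem_cons_of_mem _ h)) hpre.2
      exact ⟨by rw [hpre.1, heq], hrest⟩

theorem pvJoin'_mono (ts ss : List (List Char)) (h : ts <+: ss) : pvJoin' ts <+: pvJoin' ss := by
  obtain ⟨r, rfl⟩ := h
  refine ⟨pvJoin' r, ?_⟩
  simp [pvJoin']

theorem pvJoin'_prefix (ts : List (List Char)) : ∀ (ss : List (List Char)), pvGood ts → pvGood ss →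
    (pvJoin' ts <+: pvJoin' ss ↔ ts <+: ss) := by
  induction ts with
  | nil => intro ss _ _; simp [pvJoin']
  | cons t ts' ih =>
    intro ss hts hss
    cases ss with
    | nil =>
      simp only [pvJoin', List.map_cons, List.map_nil, List.flatten_cons, List.flatten_nil]
      constructor
      · intro h
        have := List.prefix_nil.mp h
        simp at this
      · intro h
        exact absurd (List.prefix_nil.mp h) (by simp)
    | cons s ss' =>
      have hshape : ∀ (z : List Char) (zs : List (List Char)),
          pvJoin' (z :: zs) = z ++ '/' :: pvJoin' zs := by
        intro z zs; simp [pvJoin']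
      rw [hshape, hshape]
      constructor
      · intro hpre
        obtain ⟨heq, hpre'⟩ := pv_seg_prefix t s _ _ (hts t List.mem_cons_self).2
          (hss s List.mem_cons_self).2 hpre
        subst heq
        rw [List.cons_prefix_cons]
        refine ⟨rfl, ?_⟩
        exact (ih ss' (fun x hx => hts x (List.mem_cons_of_mem _ hx))
          (fun x hx => hss x (List.mem_cons_of_mem _ hx))).mp hpre'
      · intro hpre
        obtain ⟨heq, hpre'⟩ := List.cons_prefix_cons.mp hpre
        subst heq
        have := pvJoin'_mono _ _ hpre'
        rw [← hshape, ← hshape]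
        exact pvJoin'_mono _ _ hpre

theorem pv_prefix_concat (p s : List Char) (c : Char) :
    p <+: s ++ [c] ↔ p = s ++ [c] ∨ p <+: s := by
  constructor
  · intro h
    by_cases hl : p.length ≤ s.length
    · right
      have htake := List.prefix_iff_eq_take.mp h
      rw [List.take_append_of_le_length hl] at htake
      exact htake ▸ List.take_prefix _ _
    · left
      have h1 := h.length_le
      simp at h1
      exact h.eq_of_length (by simp; omega)
  · intro h
    rcases h with h | h
    · exact h ▸ List.prefix_refl _
    · exact h.trans (List.prefix_append _ _)

theorem pv_core (np ns : List (List Char)) (hnp : pvGood np) (hns : pvGood ns) :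
    (if ns.isEmpty then true
     else if np.length < ns.length then false
     else PySem.List.slice np none (some (ns.length : Int)) == ns)
    =
    (if (PySem.Chars.join ['/'] ns).isEmpty then true
     else PySem.Chars.join ['/'] np == PySem.Chars.join ['/'] ns
          || PySem.Chars.startswith (PySem.Chars.join ['/'] np) (PySem.Chars.join ['/'] ns ++ ['/'])) := by
  by_cases hns0 : ns = []
  · subst hns0; simp [PySem.Chars.join, List.intercalate]
  · obtain ⟨n0, ns', rfl⟩ : ∃ a l, ns = a :: l := by
      cases ns with
      | nil => exact absurd rfl hns0
      | cons a l => exact ⟨a, l, rfl⟩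
    have hjne : PySem.Chars.join ['/'] (n0 :: ns') ≠ [] :=
      pv_join_ne_nil _ _ (hns n0 List.mem_cons_self).1
    have h1 : (if np.length < (n0 :: ns').length then false
        else PySem.List.slice np none (some ((n0 :: ns').length : Int)) == (n0 :: ns'))
        = decide ((n0 :: ns') <+: np) := by
      by_cases hlt : np.length < (n0 :: ns').length
      · simp only [hlt, if_true]
        symm
        simp only [decide_eq_false_iff_not]
        intro h
        have := h.length_le
        omega
      · simp only [hlt, if_false]
        rw [Bool.eq_iff_iff]
        simp only [beq_iff_eq, decide_eq_true_eq]
        rw [PySem.List.slice_to]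
        · constructor
          · intro h
            exact h ▸ List.take_prefix _ _
          · intro h
            exact (List.prefix_iff_eq_take.mp h).symm
        · exact_mod_cast Nat.zero_le _
    have h2 : (PySem.Chars.join ['/'] np == PySem.Chars.join ['/'] (n0 :: ns')
          || PySem.Chars.startswith (PySem.Chars.join ['/'] np) (PySem.Chars.join ['/'] (n0 :: ns') ++ ['/']))
        = decide ((n0 :: ns') <+: np) := by
      rw [Bool.eq_iff_iff]
      simp only [Bool.or_eq_true, beq_iff_eq, decide_eq_true_eq, PySem.Chars.startswith,
        List.isPrefixOf_iff_prefix]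
      rw [← pvJoin'_prefix (n0 :: ns') np hns hnp, pvJoin'_eq _ hns0]
      by_cases hnp0 : np = []
      · subst hnp0
        simp only [pvJoin', List.map_nil, List.flatten_nil, PySem.Chars.join, List.intercalate,
          List.intersperse_nil, List.flatten_nil]
        constructor
        · rintro (h | h)
          · exact absurd h.symm hjne
          · exact absurd (List.prefix_nil.mp h) (by simp)
        · intro h
          exact absurd (List.prefix_nil.mp h) (by simp)
      · rw [pvJoin'_eq _ hnp0, pv_prefix_concat]
        constructor
        · rintro (h | h)
          · left; rw [h]
          · right; exact h
        · rintro (h | h)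
          · left; exact (by simpa using h : _ = _).symm
          · right; exact h
    have hje : (PySem.Chars.join ['/'] (n0 :: ns')).isEmpty = false :=
      Bool.eq_false_iff.mpr (fun h => hjne (List.isEmpty_iff.mp h))
    simp only [List.isEmpty_cons, Bool.false_eq_true, if_false, hje, h1, h2]

-- A's segment list, rewritten through pvSplit / pvF / stripChars-invariance
theorem pv_a_segs (s : String) :
    ((PySem.Chars.split? (path_has_prefix_norm_sep
        (PySem.Chars.stripChars (PySem.Chars.strip s.toList) ['/'])) ['/']).getD []).filter
          (fun p => !p.isEmpty)
      = pvFN (pvSplit ((PySem.Chars.strip s.toList).map pvF)) := by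
  rw [path_has_prefix_norm_sep, pv_replace_map]
  simp only [PySem.Chars.split?, List.isEmpty_cons, Bool.false_eq_true, if_false, Option.getD_some]
  rw [pv_splitOn_eq]
  exact pv_strip_inv _

-- ===== VERDICT (by name: the statement is the Claim_ definition above) =====
theorem path_has_prefix_py_spec : Claim_equal_path_has_prefix_py := by
  intro rel_posix prefix_ _
  unfold Spec_path_has_prefix_py
  simp only [path_has_prefix_py, path_has_prefix_py_alt, pv_a_segs, pv_canon_eq, pvJ]
  exact pv_core _ _ (pv_good _) (pv_good _)
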